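-- pv_equiv track=rewrite | github.com/DeconvFFT/Games-and-Bayes | part2/store_quintris.py | block_above_holes
-- ===== SOURCE A (Python) =====
-- def block_above_holes(state,r,c):#Not giving good performance
--     total_hole_cost = 0
--     for j in range(len(state[0])):
--         for i in range(len(state)-1,0-1,-1):
--             if state[i][j] == ' ':
--                 block_above_hole = 0
--                 for k in range(i,0-1,-1):
--                     if state[k][j] == 'x':
--                         total_hole_cost+=block_above_hole
--                     else:
--                         block_above_hole+=1
--     return total_hole_cost
-- ===== SOURCE B (Python) =====
-- def block_above_holes(state, r, c):
--     # Single pass per column with two running counters instead of re-scanning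
--     # the column above every hole; boards/columns that lack a hole or an 'x'
--     # block are skipped outright (they contribute 0) via C-speed scans.
--     joined = ''.join(state)
--     if ' ' not in joined or 'x' not in joined:
--         return 0
--     total = 0
--     for col in zip(*state):
--         if ' ' not in col or 'x' not in col:
--             continue
--         xs = 0
--         cost = 0
--         for ch in col:
--             if ch == 'x':
--                 xs += 1
--             else:
--                 cost += xs
--                 if ch == ' ':
--                     total += cost
--     return total
-- ===== Notes on version B (the rewrite author's own statement) =====
-- stated objective: faster
-- what changed: Replaces A's per-hole upward re-scan of each column (three nested loops) by a single pass per column keeping a running 'x'-count and blocks-above cost, with C-speed skips of boards/columns that lack a hole or an 'x' (they contribute 0).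
import Mathlib
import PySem

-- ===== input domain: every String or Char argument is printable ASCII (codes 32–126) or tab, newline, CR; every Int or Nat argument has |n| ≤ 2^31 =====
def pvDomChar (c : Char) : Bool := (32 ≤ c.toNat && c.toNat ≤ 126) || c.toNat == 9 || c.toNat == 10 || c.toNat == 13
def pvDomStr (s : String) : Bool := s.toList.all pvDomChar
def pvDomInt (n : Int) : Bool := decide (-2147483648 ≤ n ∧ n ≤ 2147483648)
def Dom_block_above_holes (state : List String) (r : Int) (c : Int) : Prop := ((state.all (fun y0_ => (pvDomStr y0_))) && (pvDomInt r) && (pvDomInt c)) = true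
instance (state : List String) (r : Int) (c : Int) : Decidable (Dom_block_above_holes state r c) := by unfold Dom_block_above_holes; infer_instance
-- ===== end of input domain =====

-- B: one downward pass per column with two running counters instead of A's re-scan above every hole, skipping boards/columns without both a hole and an 'x' (measured faster; O(cols*rows) vs A's O(cols*rows^2)).

-- shared char access: row[j]; exact under Pre_ (every read index is in range there)
def pvChar (s : String) (i : Int) : Char := (PySem.Str.pyGet? s i).getD ' '

-- ===== PORT A =====
def block_above_holes (state : List String) (r : Int) (c : Int) : Int :=
  (PySem.List.pyRange 0 (PySem.Str.len (PySem.List.pyGetD state 0 "")) 1).foldl (fun total j =>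
    (PySem.List.pyRange ((state.length : Int) - 1) (-1) (-1)).foldl (fun total i =>
      if pvChar (PySem.List.pyGetD state i "") j = ' ' then
        ((PySem.List.pyRange i (-1) (-1)).foldl
          (fun (p : Int × Int) k =>
            if pvChar (PySem.List.pyGetD state k "") j = 'x' then (p.1 + p.2, p.2)
            else (p.1, p.2 + 1)) (total, 0)).1
      else total) total) 0

-- ===== PORT B =====
-- zip(*state): columns of the board, stopping at the shortest row (hand-ported, exact: fuel = first row's
-- length bounds the number of columns, and the emptiness guard stops exactly where Python's zip stops)
def pvZipGo : Nat → List (List Char) → List (List Char)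
  | 0, _ => []
  | n + 1, rows =>
    if rows.any List.isEmpty then []
    else (rows.map (fun row => row.headD ' ')) :: pvZipGo n (rows.map List.tail)

def pvZipStar (rows : List (List Char)) : List (List Char) :=
  match rows with
  | [] => []
  | r0 :: _ => pvZipGo r0.length rows

def block_above_holes_alt (state : List String) (r : Int) (c : Int) : Int :=
  let joined := (state.map String.toList).flatten   -- ''.join(state), as chars (exact)
  if ¬ joined.contains ' ' ∨ ¬ joined.contains 'x' then 0
  else
  (pvZipStar (state.map String.toList)).foldl (fun total col =>
    if ¬ col.contains ' ' ∨ ¬ col.contains 'x' then total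
    else
      (col.foldl (fun (s : Int × Int × Int) ch =>
          if ch = 'x' then (s.1 + 1, s.2.1, s.2.2)
          else
            let cost := s.2.1 + s.1
            (s.1, cost, if ch = ' ' then s.2.2 + cost else s.2.2))
        (0, 0, total)).2.2) 0

-- ===== PRECONDITION & SPEC =====
-- Python A raises IndexError exactly when state is empty or some row is shorter than row 0; Pre_ excludes exactly those inputs.
def Pre_block_above_holes (state : List String) (r : Int) (c : Int) : Prop :=
  state ≠ [] ∧ ∀ s ∈ state, (state.headD "").toList.length ≤ s.toList.length
instance (state : List String) (r : Int) (c : Int) : Decidable (Pre_block_above_holes state r c) := by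
  unfold Pre_block_above_holes; infer_instance

def pvWitness_block_above_holes : List String × Int × Int := (["x x", "xx ", "  ."], 0, 0)

def Spec_block_above_holes (state : List String) (r : Int) (c : Int) (out : Int) : Prop := out = block_above_holes_alt state r c
instance (state : List String) (r : Int) (c : Int) (out : Int) : Decidable (Spec_block_above_holes state r c out) := by unfold Spec_block_above_holes; infer_instance

-- ===== CLAIM (what is proved, stated in full; the proofs are below) =====
def Claim_equal_block_above_holes : Prop := ∀ (state : List String) (r : Int) (c : Int), Dom_block_above_holes state r c → Pre_block_above_holes state r c → Spec_block_above_holes state r c (block_above_holes state r c)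

-- ===== LEMMAS AND PROOFS =====

-- the column j of the board, as the chars both ports actually compare
def colOf (state : List String) (j : Int) : List Char := state.map (fun s => pvChar s j)

def colX (l : List Char) : Int := (l.countP (fun ch => ch == 'x') : Int)
def colN (l : List Char) : Int := (l.countP (fun ch => ch != 'x') : Int)

-- cost of a prefix: for every non-'x' cell, the number of 'x' cells above (before) it
def colC : List Char → Int
  | [] => 0
  | ch :: t => if ch = 'x' then colC t + colN t else colC t

-- value of A's inner upward scan on the reversed prefix
def colR : List Char → Int
  | [] => 0
  | ch :: t => if ch = 'x' then colR t else colR t + colX t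

-- total over all holes of the prefix cost
def colS (cs : List Char) : Int :=
  ((List.range cs.length).map (fun k => if cs.getD k ' ' = ' ' then colC (cs.take (k + 1)) else 0)).sum

theorem colX_cons (ch : Char) (t : List Char) :
    colX (ch :: t) = (if ch = 'x' then 1 else 0) + colX t := by
  by_cases h : ch = 'x' <;> simp [colX, h] <;> ring

theorem colN_cons (ch : Char) (t : List Char) :
    colN (ch :: t) = (if ch = 'x' then 0 else 1) + colN t := by
  by_cases h : ch = 'x' <;> simp [colN, h] <;> ring

theorem colX_append (l : List Char) (ch : Char) :
    colX (l ++ [ch]) = colX l + (if ch = 'x' then 1 else 0) := by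
  by_cases h : ch = 'x' <;> simp [colX, List.countP_append, h] <;> ring

theorem colN_append (l : List Char) (ch : Char) :
    colN (l ++ [ch]) = colN l + (if ch = 'x' then 0 else 1) := by
  by_cases h : ch = 'x' <;> simp [colN, List.countP_append, h] <;> ring

theorem colN_reverse (l : List Char) : colN l.reverse = colN l := by
  simp [colN, List.countP_reverse]

theorem colC_append (l : List Char) (ch : Char) :
    colC (l ++ [ch]) = if ch = 'x' then colC l else colC l + colX l := by
  induction l with
  | nil => simp [colC, colX, colN]
  | cons a t ih =>
    simp only [List.cons_append, colC, ih, colN_append, colX_cons]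
    split_ifs <;> ring

theorem colR_append (l : List Char) (ch : Char) :
    colR (l ++ [ch]) = if ch = 'x' then colR l + colN l else colR l := by
  induction l with
  | nil => simp [colR, colX, colN]
  | cons a t ih =>
    simp only [List.cons_append, colR, ih, colX_append, colN_cons]
    split_ifs <;> ring

theorem colR_reverse (p : List Char) : colR p.reverse = colC p := by
  induction p with
  | nil => rfl
  | cons ch t ih =>
    simp only [List.reverse_cons, colR_append, ih, colN_reverse, colC]

theorem inner_general (l : List Char) (a b : Int) :
    l.foldl (fun (p : Int × Int) ch => if ch = 'x' then (p.1 + p.2, p.2) else (p.1, p.2 + 1)) (a, b)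
      = (a + colR l + b * colX l, b + colN l) := by
  induction l generalizing a b with
  | nil => simp [colR, colX, colN]
  | cons ch t ih =>
    simp only [List.foldl_cons, colR, colX_cons, colN_cons]
    split_ifs with h <;> rw [ih] <;> refine Prod.ext ?_ ?_ <;> simp <;> ring

theorem colS_append (l : List Char) (ch : Char) :
    colS (l ++ [ch]) = colS l + (if ch = ' ' then colC (l ++ [ch]) else 0) := by
  unfold colS
  simp only [List.length_append, List.length_singleton, List.range_succ, List.map_append,
    List.sum_append, List.map_cons, List.map_nil, List.sum_cons, List.sum_nil]
  have h1 : ∀ k ∈ List.range l.length,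
      (if (l ++ [ch]).getD k ' ' = ' ' then colC ((l ++ [ch]).take (k + 1)) else 0)
        = (if l.getD k ' ' = ' ' then colC (l.take (k + 1)) else 0) := by
    intro k hk
    rw [List.mem_range] at hk
    rw [List.getD_append _ _ _ _ hk, List.take_append_of_le_length (by omega)]
  rw [List.map_congr_left h1]
  have h2 : (l ++ [ch]).getD l.length ' ' = ch := by
    simp [List.getD_eq_getElem?_getD]
  have h3 : (l ++ [ch]).take (l.length + 1) = l ++ [ch] := by
    apply List.take_of_length_le; simp
  rw [h2, h3]; ring

-- B's per-column fold, characterized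
theorem bfold (cs : List Char) (t : Int) :
    cs.foldl (fun (s : Int × Int × Int) ch =>
        if ch = 'x' then (s.1 + 1, s.2.1, s.2.2)
        else (s.1, s.2.1 + s.1, if ch = ' ' then s.2.2 + (s.2.1 + s.1) else s.2.2))
      (0, 0, t) = (colX cs, colC cs, t + colS cs) := by
  induction cs using List.reverseRecOn with
  | nil => simp [colX, colC, colS]
  | append_singleton l ch ih =>
    rw [List.foldl_append, ih]
    simp only [List.foldl_cons, List.foldl_nil, colX_append, colC_append, colS_append]
    by_cases hx : ch = 'x'
    · simp [hx]
    · by_cases hs : ch = ' ' <;> simp [hx, hs] <;> ring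

theorem map_access (state : List String) (j : Int) (m : Nat) (hm : m ≤ state.length) :
    (PySem.List.pyRange 0 (m : Int) 1).map (fun k => pvChar (PySem.List.pyGetD state k "") j)
      = (colOf state j).take m := by
  induction m with
  | zero => simp [PySem.List.pyRange_one_eq_nil]
  | succ m ih =>
    have hcast : ((m + 1 : Nat) : Int) = (m : Int) + 1 := by push_cast; ring
    rw [hcast, PySem.List.pyRange_one_succ_right (by positivity), List.map_append,
      ih (by omega)]
    have hm' : m < state.length := by omega
    have : PySem.List.pyGetD state (m : Int) "" = state[m] := by
      simp [PySem.List.pyGetD_natCast, List.getD_eq_getElem?_getD, hm']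
    simp only [List.map_cons, List.map_nil, this]
    rw [List.take_succ]
    have : (colOf state j)[m]? = some (pvChar state[m] j) := by
      simp [colOf, hm']
    simp [this]

-- A's per-column fold, characterized
theorem afold (state : List String) (j : Int) (t : Int) :
    (PySem.List.pyRange ((state.length : Int) - 1) (-1) (-1)).foldl (fun total i =>
      if pvChar (PySem.List.pyGetD state i "") j = ' ' then
        ((PySem.List.pyRange i (-1) (-1)).foldl
          (fun (p : Int × Int) k =>
            if pvChar (PySem.List.pyGetD state k "") j = 'x' then (p.1 + p.2, p.2)
            else (p.1, p.2 + 1)) (total, 0)).1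
      else total) t = t + colS (colOf state j) := by
  have hlen : (colOf state j).length = state.length := by simp [colOf]
  have hstep : ∀ (total : Int), ∀ i ∈ PySem.List.pyRange ((state.length : Int) - 1) (-1) (-1),
      (if pvChar (PySem.List.pyGetD state i "") j = ' ' then
        ((PySem.List.pyRange i (-1) (-1)).foldl
          (fun (p : Int × Int) k =>
            if pvChar (PySem.List.pyGetD state k "") j = 'x' then (p.1 + p.2, p.2)
            else (p.1, p.2 + 1)) (total, 0)).1
      else total)
      = total + (if (colOf state j).getD i.toNat ' ' = ' '
                  then colC ((colOf state j).take (i.toNat + 1)) else 0) := by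
    intro total i hi
    rw [PySem.List.mem_pyRange_neg_one] at hi
    have hi0 : 0 ≤ i := by omega
    have hin : i.toNat < state.length := by omega
    -- the examined char is the column entry
    have hchar : pvChar (PySem.List.pyGetD state i "") j = (colOf state j).getD i.toNat ' ' := by
      rw [PySem.List.pyGetD_eq_getElem state "" hi0 (by omega)]
      simp [colOf, List.getD_eq_getElem?_getD, hin]
    -- the inner scan is the reversed-prefix fold
    have hrange : PySem.List.pyRange i (-1) (-1)
        = ((PySem.List.pyRange 0 (((i.toNat + 1 : Nat) : Int)) 1)).reverse := by
      rw [PySem.List.pyRange_neg_one_eq_reverse]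
      rw [show (-1 : Int) + 1 = 0 from rfl, show i + 1 = ((i.toNat + 1 : Nat) : Int) by omega]
    have hinner : (PySem.List.pyRange i (-1) (-1)).foldl
          (fun (p : Int × Int) k =>
            if pvChar (PySem.List.pyGetD state k "") j = 'x' then (p.1 + p.2, p.2)
            else (p.1, p.2 + 1)) (total, 0)
        = (((colOf state j).take (i.toNat + 1)).reverse).foldl
            (fun (p : Int × Int) ch => if ch = 'x' then (p.1 + p.2, p.2) else (p.1, p.2 + 1))
            (total, 0) := by
      rw [hrange, ← map_access state j (i.toNat + 1) (by omega), ← List.map_reverse,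
        List.foldl_map]
    rw [hchar]
    by_cases hsp : (colOf state j).getD i.toNat ' ' = ' '
    · rw [if_pos hsp, if_pos hsp, hinner, inner_general]
      simp [colR_reverse]
    · rw [if_neg hsp, if_neg hsp]; ring
  rw [PySem.List.foldl_congr_mem _ _
    (fun total i => total + (if (colOf state j).getD i.toNat ' ' = ' '
                  then colC ((colOf state j).take (i.toNat + 1)) else 0)) t hstep]
  rw [PySem.List.foldl_add]
  congr 1
  rw [PySem.List.pyRange_neg_one_eq_reverse,
    show (-1 : Int) + 1 = 0 from rfl,
    show (state.length : Int) - 1 + 1 = ((state.length : Nat) : Int) by ring,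
    List.map_reverse, List.sum_reverse, PySem.List.pyRange_zero_natCast, List.map_map]
  unfold colS
  rw [hlen]
  congr 1

-- zip(*rows) is column extraction when every row is long enough
theorem pvZipGo_eq (n : Nat) (rows : List (List Char)) (h : ∀ r ∈ rows, n ≤ r.length) :
    pvZipGo n rows = (List.range n).map (fun j => rows.map (fun r => r.getD j ' ')) := by
  induction n generalizing rows with
  | zero => simp [pvZipGo]
  | succ n ih =>
    have hne : rows.any List.isEmpty = false := by
      rw [List.any_eq_false]
      intro r hr
      have := h r hr
      simp [List.isEmpty_iff]
      intro hnil; subst hnil; simp at this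
    rw [pvZipGo, hne]
    simp only [Bool.false_eq_true, if_false]
    rw [List.range_succ_eq_map, List.map_cons,
      ih (rows.map List.tail) (by
        intro r hr
        obtain ⟨r', hr', rfl⟩ := List.mem_map.mp hr
        have := h r' hr'
        simp [List.length_tail]; omega)]
    congr 1
    · apply List.map_congr_left
      intro r _
      cases r <;> rfl
    · rw [List.map_map]
      apply List.map_congr_left
      intro j _
      simp only [Function.comp_def, List.map_map]
      apply List.map_congr_left
      intro r _
      cases r <;> rfl

theorem colC_of_no_x (l : List Char) (h : 'x' ∉ l) : colC l = 0 := by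
  induction l with
  | nil => rfl
  | cons ch t ih =>
    have : ch ≠ 'x' := by intro hx; exact h (hx ▸ List.mem_cons_self)
    rw [colC, if_neg this]
    exact ih (fun hm => h (List.mem_cons_of_mem _ hm))

theorem colS_no_space (cs : List Char) (h : ' ' ∉ cs) : colS cs = 0 := by
  unfold colS
  apply List.sum_eq_zero
  intro x hx
  obtain ⟨k, hk, rfl⟩ := List.mem_map.mp hx
  rw [List.mem_range] at hk
  rw [if_neg]
  intro hsp
  have hmem : cs.getD k ' ' ∈ cs := by
    rw [List.getD_eq_getElem?_getD, List.getElem?_eq_getElem hk]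
    exact List.getElem_mem hk
  exact h (hsp ▸ hmem)

theorem colS_no_x (cs : List Char) (h : 'x' ∉ cs) : colS cs = 0 := by
  unfold colS
  apply List.sum_eq_zero
  intro x hx
  obtain ⟨k, hk, rfl⟩ := List.mem_map.mp hx
  split_ifs
  · exact colC_of_no_x _ (fun hm => h (List.mem_of_mem_take hm))
  · rfl

-- under Pre_, every char of an examined column occurs in the board's text
theorem colOf_mem_flatten (state : List String) (j : Nat)
    (hj : ∀ s ∈ state, j < s.toList.length) :
    ∀ ch ∈ colOf state (j : Int), ch ∈ (state.map String.toList).flatten := by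
  intro ch hch
  obtain ⟨s, hs, rfl⟩ := List.mem_map.mp hch
  have hjs := hj s hs
  have hc : pvChar s (j : Int) = s.toList[j] := by
    simp [pvChar, List.getElem?_eq_getElem hjs]
  rw [hc]
  exact List.mem_flatten.mpr ⟨s.toList, List.mem_map_of_mem hs, List.getElem_mem hjs⟩

-- per-column equality of the two outer loops, hence of the ports
theorem ports_eq (state : List String) (r c : Int)
    (hpre : Pre_block_above_holes state r c) :
    block_above_holes state r c = block_above_holes_alt state r c := by
  obtain ⟨hne, hlen⟩ := hpre
  obtain ⟨s0, rest, rfl⟩ : ∃ s0 rest, state = s0 :: rest := by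
    cases state with
    | nil => exact absurd rfl hne
    | cons a l => exact ⟨a, l, rfl⟩
  set state := s0 :: rest with hstate
  have hw : PySem.Str.len (PySem.List.pyGetD state 0 "") = (s0.toList.length : Int) := by
    simp [hstate, PySem.List.pyGetD_zero, PySem.Str.len]
  -- A is, column by column, the sum of the hole costs
  have hA : block_above_holes state r c
      = (List.range s0.toList.length).foldl
          (fun total j => total + colS (colOf state ((j : Nat) : Int))) 0 := by
    unfold block_above_holes
    rw [hw, PySem.List.pyRange_zero_natCast, List.foldl_map]
    apply PySem.List.foldl_congr_mem
    intro total j _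
    exact afold state (j : Int) total
  by_cases hG : ¬ ((state.map String.toList).flatten.contains ' ')
      ∨ ¬ ((state.map String.toList).flatten.contains 'x')
  · -- the board has no hole at all or no block at all: every column contributes 0
    simp only [block_above_holes_alt]
    rw [if_pos hG, hA]
    have hcol : ∀ j ∈ List.range s0.toList.length, colS (colOf state ((j : Nat) : Int)) = 0 := by
      intro j hj
      rw [List.mem_range] at hj
      have hjs : ∀ s ∈ state, j < s.toList.length := by
        intro s hs
        have hws : s0.toList.length ≤ s.toList.length := by simpa [hstate] using hlen s hs
        omega
      rcases hG with hG | hG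
      · have hns : ' ' ∉ (state.map String.toList).flatten := by simpa using hG
        exact colS_no_space _ (fun hm => hns (colOf_mem_flatten state j hjs _ hm))
      · have hnx : 'x' ∉ (state.map String.toList).flatten := by simpa using hG
        exact colS_no_x _ (fun hm => hnx (colOf_mem_flatten state j hjs _ hm))
    rw [PySem.List.foldl_congr_mem _ _ (fun (total : Int) (_ : Nat) => total) 0
      (by intro total j hj; rw [hcol j hj]; ring)]
    simp
  · -- the generic path: B's column list is column extraction
    have hzip : pvZipStar (state.map String.toList)
        = (List.range s0.toList.length).map (fun (j : Nat) => colOf state ((j : Nat) : Int)) := by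
      rw [hstate]
      show pvZipGo s0.toList.length _ = _
      rw [pvZipGo_eq _ _ (by
        intro r' hr'
        obtain ⟨s, hs, rfl⟩ := List.mem_map.mp hr'
        have := hlen s hs
        simpa [hstate] using this)]
      apply List.map_congr_left
      intro j _
      rw [colOf, List.map_map]
      apply List.map_congr_left
      intro s _
      simp [pvChar, List.getD_eq_getElem?_getD]
    simp only [block_above_holes_alt]
    rw [if_neg hG, hA, hzip, List.foldl_map]
    apply PySem.List.foldl_congr_mem
    intro total j _
    by_cases hg : ¬ (colOf state (j : Int)).contains ' ' ∨ ¬ (colOf state (j : Int)).contains 'x'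
    · rw [if_pos hg]
      rcases hg with hg | hg
      · rw [colS_no_space _ (by simpa using hg)]; ring
      · rw [colS_no_x _ (by simpa using hg)]; ring
    · rw [if_neg hg]
      have hB : ((colOf state (j : Int)).foldl (fun (s : Int × Int × Int) ch =>
            if ch = 'x' then (s.1 + 1, s.2.1, s.2.2)
            else
              let cost := s.2.1 + s.1
              (s.1, cost, if ch = ' ' then s.2.2 + cost else s.2.2))
          (0, 0, total)).2.2
          = ((colOf state (j : Int)).foldl (fun (s : Int × Int × Int) ch =>
            if ch = 'x' then (s.1 + 1, s.2.1, s.2.2)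
            else (s.1, s.2.1 + s.1, if ch = ' ' then s.2.2 + (s.2.1 + s.1) else s.2.2))
          (0, 0, total)).2.2 := rfl
      rw [hB, bfold]

-- ===== VERDICT (by name: the statement is the Claim_ definition above) =====
theorem block_above_holes_spec : Claim_equal_block_above_holes := by
  intro state r c _ hpre
  unfold Spec_block_above_holes
  exact ports_eq state r c hpre
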